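-- pv_equiv track=rewrite | github.com/Woobs8/advent_of_code | 2019/06/part1_solution.py | count_indirect_orbits
-- ===== SOURCE A (Python) =====
-- def count_indirect_orbits(com, dir_orbits, all_orbits):
--     orbit = dir_orbits[com]
--     if not orbit:
--         return 0
--
--     orbit_count = 0
--     for obj in orbit:
--         # check if indirect orbits have already been calculated
--         if all_orbits[obj] == -1:
--             all_orbits[obj] = count_indirect_orbits(obj, dir_orbits, all_orbits)
--         orbit_count += all_orbits[obj]+1
--     return orbit_count
-- ===== SOURCE B (Python) =====
-- def count_indirect_orbits(com, dir_orbits, all_orbits):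
--     # Pure structural recursion: reads the caller's cache (-1 = "not computed")
--     # but never writes it.  A's memo writes always store exactly the value this
--     # recursion computes, so the returned count is the same; A's in-place
--     # mutation of all_orbits is not reproduced.
--     def indirect(obj):
--         cached = all_orbits[obj]
--         if cached != -1:
--             return cached
--         return sum(indirect(child) + 1 for child in dir_orbits[obj])
--     return sum(indirect(child) + 1 for child in dir_orbits[com])
-- ===== Notes on version B (the rewrite author's own statement) =====
-- stated objective: simpler
-- what changed: Replaces A's memoized recursion that mutates the caller's all_orbits dict through a -1 sentinel with a short pure structural recursion that only reads the cache and never writes; A's memo writes always store exactly the value the pure recursion computes, so the returned count is identical (A's in-place mutation of all_orbits is not reproduced).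
import Mathlib
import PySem

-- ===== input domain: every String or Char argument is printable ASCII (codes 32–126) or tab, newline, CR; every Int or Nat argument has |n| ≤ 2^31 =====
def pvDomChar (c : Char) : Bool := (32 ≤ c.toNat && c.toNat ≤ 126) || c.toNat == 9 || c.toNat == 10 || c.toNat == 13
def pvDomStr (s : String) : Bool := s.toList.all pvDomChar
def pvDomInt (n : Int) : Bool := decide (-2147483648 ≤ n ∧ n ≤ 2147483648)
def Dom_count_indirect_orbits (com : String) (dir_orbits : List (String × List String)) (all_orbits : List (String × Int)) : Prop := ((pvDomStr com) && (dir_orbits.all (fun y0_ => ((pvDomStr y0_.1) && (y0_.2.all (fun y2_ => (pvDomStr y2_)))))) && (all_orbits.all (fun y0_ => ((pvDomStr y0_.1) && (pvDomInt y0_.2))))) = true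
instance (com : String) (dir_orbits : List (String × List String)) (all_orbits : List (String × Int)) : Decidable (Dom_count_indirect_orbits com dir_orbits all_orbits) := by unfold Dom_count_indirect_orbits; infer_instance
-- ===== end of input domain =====

-- B replaces A's sentinel-mutating memoized recursion by a pure read-only recursion (simpler);
-- A mutates all_orbits in place and B does not: the equivalence proved is about the RETURN value only.

-- ===== PORT A =====
-- Fuel-bounded transliteration of A's memoized recursion (pvStepA is the loop body of A's `for obj
-- in orbit`).  The fuel only totalizes the recursion: under Pre_ every memo-miss chain is shorter
-- than |dir_orbits| + 1, so the fuel is never exhausted.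
mutual
def pvGoA (dir : PySem.Dict String (List String)) : Nat → String → PySem.Dict String Int → Int × PySem.Dict String Int
  | 0, _, d => (0, d)
  | f + 1, com, d =>
    match PySem.Dict.get? dir com with
    | none => (0, d)                       -- dir_orbits[com]: KeyError (excluded by Pre_)
    | some orbit =>
      if orbit = [] then (0, d)            -- `if not orbit: return 0`
      else orbit.foldl (pvStepA dir f) (0, d)
termination_by f _ _ => (f, 0)

def pvStepA (dir : PySem.Dict String (List String)) (f : Nat) (st : Int × PySem.Dict String Int) (obj : String) : Int × PySem.Dict String Int :=
  match PySem.Dict.get? st.2 obj with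
  | none => st                             -- all_orbits[obj]: KeyError (excluded by Pre_)
  | some v =>
    if v = -1 then
      let r := pvGoA dir f obj st.2        -- recursive call
      -- all_orbits[obj] = …; orbit_count += all_orbits[obj] + 1 (the value just stored)
      (st.1 + r.1 + 1, PySem.Dict.insert r.2 obj r.1)
    else (st.1 + v + 1, st.2)              -- orbit_count += all_orbits[obj] + 1
termination_by (f, 1)
end

def count_indirect_orbits (com : String) (dir_orbits : List (String × List String)) (all_orbits : List (String × Int)) : Int :=
  (pvGoA (PySem.Dict.mk dir_orbits) (dir_orbits.length + 1) com (PySem.Dict.mk all_orbits)).1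

-- ===== PORT B =====
-- transliteration of Source B's pure helper `indirect` (fuel totalizes it, never exhausted under Pre_)
def pvValB (dir : PySem.Dict String (List String)) (all : PySem.Dict String Int) : Nat → String → Int
  | 0, _ => 0
  | f + 1, obj =>
    match PySem.Dict.get? all obj with
    | none => 0                            -- all_orbits[obj]: KeyError (excluded by Pre_)
    | some cached =>
      if cached = -1 then
        match PySem.Dict.get? dir obj with
        | none => 0                        -- dir_orbits[obj]: KeyError (excluded by Pre_)
        | some cs => cs.foldl (fun a c => a + pvValB dir all f c + 1) 0
      else cached

def count_indirect_orbits_alt (com : String) (dir_orbits : List (String × List String)) (all_orbits : List (String × Int)) : Int :=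
  match PySem.Dict.get? (PySem.Dict.mk dir_orbits) com with
  | none => 0                              -- dir_orbits[com]: KeyError (excluded by Pre_)
  | some cs => cs.foldl (fun a c => a + pvValB (PySem.Dict.mk dir_orbits) (PySem.Dict.mk all_orbits) (dir_orbits.length + 1) c + 1) 0

-- ===== PRECONDITION & SPEC =====
-- pvOk f k is a pure graph-shape condition on the input (it computes no counts and threads no
-- state): every path from k along "uncached" edges (child c with all_orbits[c] = -1) stays inside
-- both dicts and has length < f — the standard bounded-depth statement that the memo-miss part of
-- the graph under k is complete and acyclic.
def pvOk (dir : PySem.Dict String (List String)) (all : PySem.Dict String Int) : Nat → String → Bool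
  | 0, _ => false
  | f + 1, k =>
    match PySem.Dict.get? dir k with
    | none => false
    | some cs => cs.all (fun c =>
        match PySem.Dict.get? all c with
        | none => false
        | some v => if v = -1 then pvOk dir all f c else true)

-- Exactly the inputs on which the Python A returns: `com` is a key of dir_orbits, every object the
-- recursion reaches is a key of both dicts, and no cycle of uncached (-1) nodes is reachable — a
-- path of |dir_orbits| + 1 memo-miss steps must repeat a key, i.e. be a cycle, on which A recurses
-- forever, so the depth bound loses nothing.
def Pre_count_indirect_orbits (com : String) (dir_orbits : List (String × List String)) (all_orbits : List (String × Int)) : Prop :=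
  pvOk (PySem.Dict.mk dir_orbits) (PySem.Dict.mk all_orbits) (dir_orbits.length + 1) com = true
instance (com : String) (dir_orbits : List (String × List String)) (all_orbits : List (String × Int)) : Decidable (Pre_count_indirect_orbits com dir_orbits all_orbits) := by unfold Pre_count_indirect_orbits; infer_instance

def pvWitness_count_indirect_orbits : String × (List (String × List String)) × (List (String × Int)) :=
  ("COM", [("COM", ["A", "B"]), ("A", ["B"]), ("B", [])], [("A", -1), ("B", -1)])

def Spec_count_indirect_orbits (com : String) (dir_orbits : List (String × List String)) (all_orbits : List (String × Int)) (out : Int) : Prop := out = count_indirect_orbits_alt com dir_orbits all_orbits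
instance (com : String) (dir_orbits : List (String × List String)) (all_orbits : List (String × Int)) (out : Int) : Decidable (Spec_count_indirect_orbits com dir_orbits all_orbits out) := by unfold Spec_count_indirect_orbits; infer_instance

-- ===== CLAIM (what is proved, stated in full; the proofs are below) =====
def Claim_equal_count_indirect_orbits : Prop := ∀ (com : String) (dir_orbits : List (String × List String)) (all_orbits : List (String × Int)), Dom_count_indirect_orbits com dir_orbits all_orbits → Pre_count_indirect_orbits com dir_orbits all_orbits → Spec_count_indirect_orbits com dir_orbits all_orbits (count_indirect_orbits com dir_orbits all_orbits)

-- ===== LEMMAS AND PROOFS =====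

-- the per-child condition of pvOk (proof-side name for pvOk's inner lambda)
def pvChildOk (dir : PySem.Dict String (List String)) (all : PySem.Dict String Int) (f : Nat) (c : String) : Bool :=
  match PySem.Dict.get? all c with
  | none => false
  | some v => if v = -1 then pvOk dir all f c else true

-- the value B's helper assigns to an uncached node: the sum over its children
def pvBody (dir : PySem.Dict String (List String)) (all : PySem.Dict String Int) (f : Nat) (k : String) : Int :=
  match PySem.Dict.get? dir k with
  | none => 0
  | some cs => cs.foldl (fun a c => a + pvValB dir all f c + 1) 0

-- invariant on A's mutated dict: every entry is either the original one or a memo write, and memo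
-- writes store exactly the pure value pvBody of a node that was uncached (-1) in the original dict
def pvValid (dir : PySem.Dict String (List String)) (all d : PySem.Dict String Int) : Prop :=
  (∀ k, (PySem.Dict.get? all k).isSome → (PySem.Dict.get? d k).isSome) ∧
  (∀ k v, PySem.Dict.get? d k = some v →
    PySem.Dict.get? all k = some v ∨
    (PySem.Dict.get? all k = some (-1) ∧ ∃ f, pvOk dir all f k = true ∧ v = pvBody dir all f k))

lemma pvOk_succ_elim {dir : PySem.Dict String (List String)} {all : PySem.Dict String Int} {f : Nat} {k : String}
    (h : pvOk dir all (f + 1) k = true) :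
    ∃ cs, PySem.Dict.get? dir k = some cs ∧ ∀ c ∈ cs, pvChildOk dir all f c = true := by
  unfold pvOk at h
  cases hdir : PySem.Dict.get? dir k with
  | none => rw [hdir] at h; simp at h
  | some cs =>
    rw [hdir] at h
    exact ⟨cs, rfl, by simpa [List.all_eq_true, pvChildOk] using h⟩

lemma pvValB_succ_eq_body {dir : PySem.Dict String (List String)} {all : PySem.Dict String Int} {f : Nat} {c : String}
    (h1 : PySem.Dict.get? all c = some (-1)) (h2 : (PySem.Dict.get? dir c).isSome) :
    pvValB dir all (f + 1) c = pvBody dir all f c := by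
  obtain ⟨cs, hcs⟩ := Option.isSome_iff_exists.mp h2
  simp [pvValB, pvBody, h1, hcs]

lemma pvBody_indep (dir : PySem.Dict String (List String)) (all : PySem.Dict String Int) :
    ∀ f g k, pvOk dir all f k = true → pvOk dir all g k = true →
    pvBody dir all f k = pvBody dir all g k := by
  intro f
  induction f using Nat.strong_induction_on with
  | _ f IH =>
    intro g k hf hg
    match f, g with
    | 0, _ => simp [pvOk] at hf
    | _ + 1, 0 => simp [pvOk] at hg
    | f + 1, g + 1 =>
      obtain ⟨cs, hdir, hcsf⟩ := pvOk_succ_elim hf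
      obtain ⟨cs', hdir', hcsg⟩ := pvOk_succ_elim hg
      rw [hdir] at hdir'; injection hdir' with hcs; subst hcs
      simp only [pvBody, hdir]
      refine PySem.List.foldl_congr_mem _ _ _ _ ?_
      intro a c hc
      have h1 := hcsf c hc
      have h2 := hcsg c hc
      unfold pvChildOk at h1 h2
      cases hac : PySem.Dict.get? all c with
      | none => rw [hac] at h1; simp at h1
      | some v =>
        simp only [hac] at h1 h2
        by_cases hv : v = -1
        · rw [if_pos hv] at h1 h2
          subst hv
          have hdirc : (PySem.Dict.get? dir c).isSome := by
            cases hf1 : f with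
            | zero => rw [hf1] at h1; simp [pvOk] at h1
            | succ f' =>
              rw [hf1] at h1
              obtain ⟨cs2, h2', -⟩ := pvOk_succ_elim h1
              simp [h2']
          rw [pvValB_succ_eq_body hac hdirc, pvValB_succ_eq_body hac hdirc]
          rw [IH f (by omega) g c h1 h2]
        · simp [pvValB, hac, hv]

lemma pvOk_dir_isSome {dir : PySem.Dict String (List String)} {all : PySem.Dict String Int} {f : Nat} {c : String}
    (h : pvOk dir all f c = true) : (PySem.Dict.get? dir c).isSome := by
  cases f with
  | zero => simp [pvOk] at h
  | succ f => obtain ⟨cs, h', -⟩ := pvOk_succ_elim h; simp [h']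

lemma pvGoA_spec (dir : PySem.Dict String (List String)) (all : PySem.Dict String Int) :
    ∀ f k d, pvOk dir all f k = true → pvValid dir all d →
    (pvGoA dir f k d).1 = pvBody dir all f k ∧ pvValid dir all (pvGoA dir f k d).2 := by
  intro f
  induction f with
  | zero => intro k d h _; simp [pvOk] at h
  | succ f IH =>
    intro k d hok hval
    obtain ⟨cs, hdir, hcs⟩ := pvOk_succ_elim hok
    have main : ∀ (l : List String), (∀ c ∈ l, pvChildOk dir all f c = true) →
        ∀ (a : Int) (d : PySem.Dict String Int), pvValid dir all d →
        (l.foldl (pvStepA dir f) (a, d)).1 = l.foldl (fun x c => x + pvValB dir all (f + 1) c + 1) a ∧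
        pvValid dir all (l.foldl (pvStepA dir f) (a, d)).2 := by
      intro l
      induction l with
      | nil => intro _ a d hv; exact ⟨rfl, hv⟩
      | cons c rest ih =>
        intro hl a d hv
        have hc := hl c (by simp)
        have hrest : ∀ x ∈ rest, pvChildOk dir all f x = true := fun x hx => hl x (by simp [hx])
        cases hac : PySem.Dict.get? all c with
        | none => simp [pvChildOk, hac] at hc
        | some v =>
          simp only [pvChildOk, hac] at hc
          have hdsome : (PySem.Dict.get? d c).isSome := hv.1 c (by simp [hac])
          obtain ⟨w, hdc⟩ := Option.isSome_iff_exists.mp hdsome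
          by_cases hw : w = -1
          · -- memo miss: A recurses and stores the result
            have hallc : PySem.Dict.get? all c = some (-1) := by
              rcases hv.2 c w hdc with h | h
              · rw [← hw]; exact h
              · exact h.1
            have hv1 : v = -1 := by rw [hallc] at hac; injection hac with h; omega
            have hokfc : pvOk dir all f c = true := by simpa [hv1] using hc
            have hdirc : (PySem.Dict.get? dir c).isSome := pvOk_dir_isSome hokfc
            have hIH := IH c d hokfc hv
            have hstep : pvStepA dir f (a, d) c =
                (a + (pvGoA dir f c d).1 + 1, PySem.Dict.insert (pvGoA dir f c d).2 c (pvGoA dir f c d).1) := by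
              simp [pvStepA, hdc, hw]
            have hbval : pvValB dir all (f + 1) c = (pvGoA dir f c d).1 := by
              rw [pvValB_succ_eq_body hallc hdirc, hIH.1]
            have hvalid' : pvValid dir all (PySem.Dict.insert (pvGoA dir f c d).2 c (pvGoA dir f c d).1) := by
              constructor
              · intro k hk
                rw [PySem.Dict.get?_insert]
                split
                · simp
                · exact hIH.2.1 k hk
              · intro k v' hkv
                rw [PySem.Dict.get?_insert] at hkv
                split at hkv
                · rename_i hkc
                  subst hkc
                  injection hkv with hv'
                  exact Or.inr ⟨hallc, f, hokfc, by rw [← hv', hIH.1]⟩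
                · exact hIH.2.2 k v' hkv
            have hmain := ih hrest (a + (pvGoA dir f c d).1 + 1) _ hvalid'
            rw [List.foldl_cons, List.foldl_cons, hstep, hbval]
            exact hmain
          · -- cache hit: A uses the stored value
            have hstep : pvStepA dir f (a, d) c = (a + w + 1, d) := by
              simp [pvStepA, hdc, hw]
            have hbval : pvValB dir all (f + 1) c = w := by
              rcases hv.2 c w hdc with h | ⟨h1, f', hok', hbody⟩
              · have hvw : v = w := by rw [h] at hac; injection hac with h'; omega
                subst hvw
                simp [pvValB, hac, hw]
              · have hv1 : v = -1 := by rw [h1] at hac; injection hac with h'; omega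
                have hokfc : pvOk dir all f c = true := by simpa [hv1] using hc
                rw [pvValB_succ_eq_body h1 (pvOk_dir_isSome hokfc),
                  pvBody_indep dir all f f' c hokfc hok', ← hbody]
            have hmain := ih hrest (a + w + 1) d hv
            rw [List.foldl_cons, List.foldl_cons, hstep, hbval]
            exact hmain
    simp only [pvGoA, hdir]
    split_ifs with hemp
    · subst hemp
      exact ⟨by simp [pvBody, hdir], hval⟩
    · have hmain := main cs hcs 0 d hval
      exact ⟨by rw [hmain.1]; simp [pvBody, hdir], hmain.2⟩

-- ===== VERDICT (by name: the statement is the Claim_ definition above) =====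
theorem count_indirect_orbits_spec : Claim_equal_count_indirect_orbits := by
  intro com dir_orbits all_orbits _ hpre
  unfold Pre_count_indirect_orbits at hpre
  unfold Spec_count_indirect_orbits count_indirect_orbits count_indirect_orbits_alt
  have h := pvGoA_spec (PySem.Dict.mk dir_orbits) (PySem.Dict.mk all_orbits)
    (dir_orbits.length + 1) com (PySem.Dict.mk all_orbits) hpre
    ⟨fun _ hk => hk, fun _ _ h => Or.inl h⟩
  rw [h.1]
  obtain ⟨cs, hdir, -⟩ := pvOk_succ_elim hpre
  simp [pvBody, hdir]
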